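-- pv_equiv track=rewrite | github.com/TimDSchwabe/textMining | assignment2/ex2/utils.py | word_2_index
-- ===== SOURCE A (Python) =====
-- from collections import Counter
--
-- def word_2_index(sents):
--     vocab = Counter()
--     for sent in sents:
--         for w in sent:
--             vocab[w] += 1
--     i = 0
--     word2index = {}
--     for w in vocab:
--         if vocab[w] >= 1:
--             word2index[w] = i
--             i += 1
--     return word2index
-- ===== SOURCE B (Python) =====
-- def word_2_index(sents):
--     word2index = {}
--     i = 0
--     for sent in sents:
--         for w in sent:
--             if w not in word2index:
--                 word2index[w] = i
--                 i += 1
--     return word2index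
-- ===== Notes on version B (the rewrite author's own statement) =====
-- stated objective: simpler
-- what changed: Replaced A's two-phase structure (build a Counter over all words, then scan the Counter's keys with an always-true count>=1 guard to assign indices) by a single pass that assigns the next index to each word on first sight.
import Mathlib
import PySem

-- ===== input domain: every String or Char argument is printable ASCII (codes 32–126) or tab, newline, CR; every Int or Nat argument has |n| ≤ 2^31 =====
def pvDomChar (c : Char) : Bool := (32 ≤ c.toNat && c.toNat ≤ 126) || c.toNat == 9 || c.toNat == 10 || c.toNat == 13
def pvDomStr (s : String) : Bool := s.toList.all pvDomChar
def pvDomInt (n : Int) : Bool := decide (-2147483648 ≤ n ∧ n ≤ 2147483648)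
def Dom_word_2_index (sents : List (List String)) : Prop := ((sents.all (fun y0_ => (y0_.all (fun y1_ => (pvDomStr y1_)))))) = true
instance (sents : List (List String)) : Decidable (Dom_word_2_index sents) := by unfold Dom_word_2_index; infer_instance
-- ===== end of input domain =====

-- B replaces A's two-phase build-Counter-then-scan-keys structure by one pass that
-- indexes each word on first sight (objective: simpler; same return value).

-- ===== PORT A =====
def word_2_index (sents : List (List String)) : List (String × Int) :=
  -- vocab = Counter(); for sent in sents: for w in sent: vocab[w] += 1
  let vocab : PySem.Dict String Int :=
    sents.foldl (fun vocab sent =>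
      sent.foldl (fun vocab w => vocab.modify w 0 (· + 1)) vocab) PySem.Dict.empty
  -- i = 0; word2index = {}; for w in vocab: if vocab[w] >= 1: word2index[w] = i; i += 1
  let st :=
    vocab.keys.foldl (fun (st : Int × PySem.Dict String Int) w =>
      if vocab.getD w 0 ≥ 1 then (st.1 + 1, st.2.insert w st.1) else st)
      (0, PySem.Dict.empty)
  st.2.items

-- ===== PORT B =====
def word_2_index_alt (sents : List (List String)) : List (String × Int) :=
  -- word2index = {}; i = 0; for sent in sents: for w in sent:
  --   if w not in word2index: word2index[w] = i; i += 1
  let st :=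
    sents.foldl (fun st sent =>
      sent.foldl (fun (st : PySem.Dict String Int × Int) w =>
        if st.1.contains w then st else (st.1.insert w st.2, st.2 + 1)) st)
      (PySem.Dict.empty, 0)
  st.1.items

-- ===== PRECONDITION & SPEC =====
def Spec_word_2_index (sents : List (List String)) (out : List (String × Int)) : Prop := out = word_2_index_alt sents
instance (sents : List (List String)) (out : List (String × Int)) : Decidable (Spec_word_2_index sents out) := by unfold Spec_word_2_index; infer_instance

-- ===== CLAIM (what is proved, stated in full; the proofs are below) =====
def Claim_equal_word_2_index : Prop := ∀ (sents : List (List String)), Dom_word_2_index sents → Spec_word_2_index sents (word_2_index sents)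

-- ===== LEMMAS AND PROOFS =====

-- words paired with consecutive indices starting at i
def pvEzip (l : List String) (i : Int) : List (String × Int) :=
  match l with
  | [] => []
  | w :: l => (w, i) :: pvEzip l (i + 1)

-- first-appearance dedup of ws relative to already-seen words
def pvFresh (seen : List String) (ws : List String) : List String :=
  match ws with
  | [] => []
  | w :: ws => if w ∈ seen then pvFresh seen ws else w :: pvFresh (seen ++ [w]) ws

theorem pvSet_update_eq_append_fresh (ws : List String) (s : List String) :
    PySem.Set.update s ws = s ++ pvFresh s ws := by
  induction ws generalizing s with
  | nil => simp [pvFresh, PySem.Set.update_nil]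
  | cons w ws ih =>
    rw [PySem.Set.update_cons]
    by_cases h : w ∈ s
    · simp [pvFresh, h, ih]
    · simp [pvFresh, h, ih]

theorem pvSet_ofList_eq_fresh (ws : List String) :
    PySem.Set.ofList ws = pvFresh [] ws := by
  rw [← PySem.Set.update_nil_left, pvSet_update_eq_append_fresh]; simp

-- A's second loop: over nodup keys fresh to the accumulator, with the guard always true,
-- it appends the keys paired with consecutive indices.
theorem pvAfold (vocab : PySem.Dict String Int) (l : List String) (i : Int)
    (d : PySem.Dict String Int)
    (hc : ∀ w ∈ l, 1 ≤ vocab.getD w 0)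
    (hf : ∀ w ∈ l, d.contains w = false)
    (hn : l.Nodup) :
    (l.foldl (fun (st : Int × PySem.Dict String Int) w =>
        if vocab.getD w 0 ≥ 1 then (st.1 + 1, st.2.insert w st.1) else st) (i, d)).2.items
      = d.items ++ pvEzip l i := by
  induction l generalizing i d with
  | nil => simp [pvEzip]
  | cons w l ih =>
    have hcw : vocab.getD w 0 ≥ 1 := hc w (List.mem_cons_self)
    have hfw : d.contains w = false := hf w (List.mem_cons_self)
    simp only [List.foldl_cons, if_pos hcw]
    rw [ih (i + 1) (d.insert w i)
      (fun x hx => hc x (List.mem_cons_of_mem _ hx))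
      (fun x hx => by
        rw [PySem.Dict.contains_insert]
        have hxw : x ≠ w := fun he => (List.nodup_cons.mp hn).1 (he ▸ hx)
        simp [hxw, hf x (List.mem_cons_of_mem _ hx)])
      (List.nodup_cons.mp hn).2]
    rw [PySem.Dict.items_insert_of_not_contains d i hfw]
    simp [pvEzip]

-- B's loop over the flattened word list: it appends the fresh words paired with
-- consecutive indices continuing from the accumulator's counter.
theorem pvBfold (ws : List String) (d : PySem.Dict String Int) (i : Int) :
    (ws.foldl (fun (st : PySem.Dict String Int × Int) w =>
        if st.1.contains w then st else (st.1.insert w st.2, st.2 + 1)) (d, i)).1.items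
      = d.items ++ pvEzip (pvFresh d.keys ws) i := by
  induction ws generalizing d i with
  | nil => simp [pvFresh, pvEzip]
  | cons w ws ih =>
    by_cases h : d.contains w = true
    · have hm : w ∈ d.keys := (PySem.Dict.contains_iff_mem_keys d w).mp h
      simp only [List.foldl_cons, if_pos h, pvFresh, if_pos hm]
      exact ih d i
    · have h' : d.contains w = false := by simpa using h
      have hm : w ∉ d.keys := fun hw => h ((PySem.Dict.contains_iff_mem_keys d w).mpr hw)
      simp only [List.foldl_cons, if_neg h, pvFresh, if_neg hm]
      rw [ih (d.insert w i) (i + 1),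
        PySem.Dict.items_insert_of_not_contains d i h',
        PySem.Dict.keys_insert_of_not_contains d i h']
      simp [pvEzip]

-- ===== VERDICT (by name: the statement is the Claim_ definition above) =====
theorem word_2_index_spec : Claim_equal_word_2_index := by
  intro sents _
  unfold Spec_word_2_index word_2_index word_2_index_alt
  rw [show (sents.foldl (fun vocab sent =>
        sent.foldl (fun vocab w => vocab.modify w 0 (· + 1)) vocab) PySem.Dict.empty)
      = PySem.Dict.counter sents.flatten by
    rw [PySem.Dict.counter_eq_foldl, ← List.foldl_flatten]]
  rw [show (sents.foldl (fun st sent =>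
        sent.foldl (fun (st : PySem.Dict String Int × Int) w =>
          if st.1.contains w then st else (st.1.insert w st.2, st.2 + 1)) st)
        (PySem.Dict.empty, 0))
      = sents.flatten.foldl (fun (st : PySem.Dict String Int × Int) w =>
          if st.1.contains w then st else (st.1.insert w st.2, st.2 + 1))
        (PySem.Dict.empty, 0) by rw [← List.foldl_flatten]]
  rw [pvBfold, pvAfold (PySem.Dict.counter sents.flatten) _ 0 PySem.Dict.empty
    (fun w hw => by
      rw [PySem.Dict.getD_counter]
      have : 0 < sents.flatten.count w := List.count_pos_iff.mpr
        ((PySem.Set.mem_ofList _ _).mp (by simpa [PySem.Dict.keys_counter] using hw))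
      omega)
    (fun w _ => PySem.Dict.contains_empty w)
    (by rw [PySem.Dict.keys_counter]; exact PySem.Set.nodup_ofList _)]
  simp [PySem.Dict.keys_counter, pvSet_ofList_eq_fresh, PySem.Dict.keys_empty]
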